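-- pv_equiv track=rewrite | github.com/jes2ica/stanford-scpd | CS221/foundations/submission.py | mutateSentences
-- ===== SOURCE A (Python) =====
-- def mutateSentences(sentence):
--     """
--     Given a sentence (sequence of words), return a list of all "similar"
--     sentences.
--     We define a sentence to be similar to the original sentence if
--       - it as the same number of words, and
--       - each pair of adjacent words in the new sentence also occurs in the original sentence
--         (the words within each pair should appear in the same order in the output sentence
--          as they did in the orignal sentence.)
--     Notes:
--       - The order of the sentences you output doesn't matter.
--       - You must not output duplicates.
--       - Your generated sentence can use a word in the original sentence more than
--         once.
--     Example:
--       - Input: 'the cat and the mouse'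
--       - Output: ['and the cat and the', 'the cat and the mouse', 'the cat and the cat', 'cat and the cat and']
--                 (reordered versions of this list are allowed)
--     """
--     # Build the graph
--     graph = {}
--     words = sentence.split()
--     res = set()
--     for i in range(len(words) - 1):
--         w = words[i]
--         if not w in graph:
--             graph[w] = set()
--         graph[w].add(words[i + 1])
--     # Helper function that recursively find and append next word
--     def helper(graph, length, tmp, res):
--         if len(tmp) == length:
--             res.add(' '.join(tmp))
--             return
--         cur = tmp[-1]
--         if cur not in graph:
--             return
--         for word in graph[cur]:
--             tmp.append(word)
--             helper(graph, length, tmp, res)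
--             tmp.pop()
--     # For each vertex in the graph, call the helper function
--     for word in graph:
--         helper(graph, len(words), [word], res)
--     return res
-- ===== SOURCE B (Python) =====
-- def mutateSentences(sentence):
--     words = sentence.split()
--     graph = {}
--     for a, b in zip(words, words[1:]):
--         nexts = graph.get(a, [])
--         if b not in nexts:
--             nexts.append(b)
--         graph[a] = nexts
--     paths = [[w] for w in graph]
--     for _ in range(len(words) - 1):
--         paths = [p + [n] for p in paths for n in graph.get(p[-1], [])]
--     return {' '.join(p) for p in paths}
-- ===== Notes on version B (the rewrite author's own statement) =====
-- stated objective: simpler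
-- what changed: Replaces the recursive DFS helper with shared mutable tmp/res state by a flat layered expansion: seed one single-word path per graph key, extend every partial path by all graph successors for len(words)-1 rounds, then join into a set.
import Mathlib
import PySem

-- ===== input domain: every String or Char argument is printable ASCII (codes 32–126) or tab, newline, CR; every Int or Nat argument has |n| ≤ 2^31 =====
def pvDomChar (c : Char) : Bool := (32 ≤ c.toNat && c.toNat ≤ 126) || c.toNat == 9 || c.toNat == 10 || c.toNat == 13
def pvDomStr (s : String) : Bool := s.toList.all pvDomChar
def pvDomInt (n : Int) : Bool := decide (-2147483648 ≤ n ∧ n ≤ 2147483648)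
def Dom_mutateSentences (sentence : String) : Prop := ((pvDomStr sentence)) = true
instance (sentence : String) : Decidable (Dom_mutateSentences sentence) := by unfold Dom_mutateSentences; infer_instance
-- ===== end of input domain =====

-- B replaces A's recursive DFS helper (shared mutable tmp/res) by a layered expansion of
-- partial paths followed by one set construction (objective: a simpler, flatter decomposition).
-- Both programs return a Python set of strings, ported as a List of its distinct elements.

-- ===== PORT A =====
-- helper(graph, length, tmp, res): tmp starts as [word] and grows by one word per call, so
-- `len(tmp) == length` is reached exactly when `fuel := length - len(tmp)` counts down to 0;
-- fuel is that countdown.  tmp is never empty, so `tmp.getLastD ""` is exactly tmp[-1].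
def helperA (graph : PySem.Dict String (PySem.Set String)) (fuel : Nat)
    (tmp : List String) (res : PySem.Set String) : PySem.Set String :=
  match fuel with
  | 0 => res.add (PySem.Str.join " " tmp)                      -- res.add(' '.join(tmp))
  | f + 1 =>
    match graph.get? (tmp.getLastD "") with                    -- cur = tmp[-1]; if cur not in graph: return
    | none => res
    | some succs =>                                            -- for word in graph[cur]: tmp.append; recurse; tmp.pop
      succs.foldl (fun r word => helperA graph f (tmp ++ [word]) r) res

def mutateSentences (sentence : String) : List String :=
  let words := PySem.Str.split₀ sentence
  -- for i in range(len(words)-1): indices i and i+1 are in range, so `getD _ ""` is exactly words[i]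
  let graph := (List.range (words.length - 1)).foldl
    (fun g i =>
      let w := words.getD i ""
      let g := if g.contains w then g else g.insert w PySem.Set.empty
      g.modify w PySem.Set.empty (fun s => s.add (words.getD (i + 1) "")))
    PySem.Dict.empty
  -- for word in graph: helper(graph, len(words), [word], res)
  graph.keys.foldl (fun res word => helperA graph (words.length - 1) [word] res) PySem.Set.empty

-- ===== PORT B =====
-- one expansion round: paths = [p + [n] for p in paths for n in graph.get(p[-1], [])]
-- (every partial path is nonempty, so `p.getLastD ""` is exactly p[-1])
def expandB (graph : PySem.Dict String (PySem.Set String))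
    (paths : List (List String)) : List (List String) :=
  paths.flatMap (fun p =>
    ((graph.getD (p.getLastD "") PySem.Set.empty : List String)).map (fun n => p ++ [n]))

def mutateSentences_alt (sentence : String) : List String :=
  let words := PySem.Str.split₀ sentence
  -- for a, b in zip(words, words[1:]): nexts = graph.get(a, []); dedup-append b; graph[a] = nexts
  let graph := (words.zip words.tail).foldl
    (fun g ab => g.insert ab.1 ((g.getD ab.1 PySem.Set.empty).add ab.2))
    PySem.Dict.empty
  let paths := graph.keys.map (fun w => [w])
  let paths := (List.range (words.length - 1)).foldl (fun ps _ => expandB graph ps) paths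
  PySem.Set.ofList (paths.map (fun p => PySem.Str.join " " p))

-- ===== PRECONDITION & SPEC =====
def Spec_mutateSentences (sentence : String) (out : List String) : Prop := out = mutateSentences_alt sentence
instance (sentence : String) (out : List String) : Decidable (Spec_mutateSentences sentence out) := by unfold Spec_mutateSentences; infer_instance

-- ===== CLAIM (what is proved, stated in full; the proofs are below) =====
def Claim_equal_mutateSentences : Prop := ∀ (sentence : String), Dom_mutateSentences sentence → Spec_mutateSentences sentence (mutateSentences sentence)

-- ===== LEMMAS AND PROOFS =====

-- proof-only: the full-length continuations of a partial path, in DFS order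
def pathsFrom (graph : PySem.Dict String (PySem.Set String)) :
    Nat → List String → List (List String)
  | 0, tmp => [tmp]
  | f + 1, tmp =>
    match graph.get? (tmp.getLastD "") with
    | none => []
    | some succs => succs.flatMap (fun w => pathsFrom graph f (tmp ++ [w]))

theorem foldl_update_eq_update_flatMap {α β : Type} [BEq β] (h : α → List β)
    (l : List α) (s : PySem.Set β) :
    l.foldl (fun r w => PySem.Set.update r (h w)) s = s.update (l.flatMap h) := by
  induction l generalizing s with
  | nil => simp [PySem.Set.update]
  | cons x xs ih =>
    rw [List.flatMap_cons, List.foldl_cons, ih]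
    simp [PySem.Set.update, List.foldl_append]

theorem helperA_eq (graph : PySem.Dict String (PySem.Set String)) (fuel : Nat)
    (tmp : List String) (res : PySem.Set String) :
    helperA graph fuel tmp res
      = res.update ((pathsFrom graph fuel tmp).map (PySem.Str.join " ")) := by
  induction fuel generalizing tmp res with
  | zero => simp [helperA, pathsFrom, PySem.Set.update]
  | succ f ih =>
    simp only [helperA, pathsFrom]
    cases graph.get? (tmp.getLastD "") with
    | none => simp [PySem.Set.update]
    | some succs =>
      simp only [List.map_flatMap]
      rw [← foldl_update_eq_update_flatMap]
      exact PySem.List.foldl_congr_mem _ _ _ _ (fun acc x _ => ih _ _)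

theorem getD_empty_of_not_contains (g : PySem.Dict String (PySem.Set String)) (w : String)
    (h : g.contains w = false) : g.getD w PySem.Set.empty = PySem.Set.empty := by
  simp only [PySem.Dict.contains, List.any_eq_false, beq_iff_eq, Prod.forall,
    PySem.Dict.getD, PySem.Dict.get?, PySem.Set.empty_eq] at *
  rw [List.find?_eq_none.mpr]
  · rfl
  · intro p hp
    simp only [beq_iff_eq]
    exact h p.1 p.2 hp

theorem graph_step_eq (g : PySem.Dict String (PySem.Set String)) (w b : String) :
    (let g' := if g.contains w then g else g.insert w PySem.Set.empty;
     g'.modify w PySem.Set.empty (fun s => s.add b))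
    = g.insert w ((g.getD w PySem.Set.empty).add b) := by
  cases h : g.contains w with
  | true => simp [PySem.Dict.modify]
  | false =>
    simp only [Bool.false_eq_true, if_false, PySem.Dict.modify,
      PySem.Dict.getD_insert, PySem.Dict.insert_insert_self]
    rw [getD_empty_of_not_contains g w h]
    simp

theorem range_map_adj (ws : List String) :
    (List.range (ws.length - 1)).map (fun i => (ws.getD i "", ws.getD (i + 1) ""))
      = ws.zip ws.tail := by
  apply List.ext_getElem
  · simp
  · intro i h1 h2
    simp only [List.getElem_map, List.getElem_range, List.getElem_zip, List.getElem_tail]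
    simp only [List.length_map, List.length_range, List.length_zip, List.length_tail] at h1 h2
    rw [List.getD_eq_getElem _ _ (by omega), List.getD_eq_getElem _ _ (by omega)]

theorem graph_eq (ws : List String) :
    (List.range (ws.length - 1)).foldl
      (fun g i =>
        let w := ws.getD i ""
        let g := if g.contains w then g else g.insert w PySem.Set.empty
        g.modify w PySem.Set.empty (fun s => s.add (ws.getD (i + 1) "")))
      PySem.Dict.empty
    = (ws.zip ws.tail).foldl
        (fun g ab => g.insert ab.1 ((g.getD ab.1 PySem.Set.empty).add ab.2))
        PySem.Dict.empty := by
  rw [← range_map_adj ws, List.foldl_map]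
  exact PySem.List.foldl_congr_mem _ _ _ _ (fun g i _ => graph_step_eq g (ws.getD i "") (ws.getD (i + 1) ""))

theorem expandB_pathsFrom (graph : PySem.Dict String (PySem.Set String)) (n : Nat)
    (tmp : List String) :
    expandB graph (pathsFrom graph n tmp) = pathsFrom graph (n + 1) tmp := by
  induction n generalizing tmp with
  | zero =>
    simp only [pathsFrom, expandB, List.flatMap_singleton, PySem.Dict.getD]
    cases graph.get? (tmp.getLastD "") with
    | none => rfl
    | some succs => exact List.map_eq_flatMap
  | succ f ih =>
    show expandB graph (pathsFrom graph (f + 1) tmp) = pathsFrom graph (f + 1 + 1) tmp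
    simp only [pathsFrom]
    cases graph.get? (tmp.getLastD "") with
    | none => simp [expandB]
    | some succs =>
      simp only [expandB, List.flatMap_assoc]
      exact List.flatMap_congr (fun w _ => ih (tmp ++ [w]))

theorem foldl_expandB (graph : PySem.Dict String (PySem.Set String)) (n : Nat)
    (ps : List (List String)) :
    (List.range n).foldl (fun ps _ => expandB graph ps) ps
      = ps.flatMap (pathsFrom graph n) := by
  induction n with
  | zero => simp [pathsFrom, List.flatMap_singleton']
  | succ f ih =>
    rw [List.range_succ, List.foldl_append, ih, List.foldl_cons, List.foldl_nil,
      expandB, List.flatMap_assoc]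
    exact List.flatMap_congr (fun p _ => expandB_pathsFrom graph f p)

-- ===== VERDICT (by name: the statement is the Claim_ definition above) =====
theorem mutateSentences_spec : Claim_equal_mutateSentences := by
  intro s _
  unfold Spec_mutateSentences
  simp only [mutateSentences, mutateSentences_alt]
  rw [graph_eq (PySem.Str.split₀ s), foldl_expandB]
  generalize ((PySem.Str.split₀ s).zip (PySem.Str.split₀ s).tail).foldl
    (fun g ab => g.insert ab.1 ((g.getD ab.1 PySem.Set.empty).add ab.2)) PySem.Dict.empty = g
  rw [PySem.List.foldl_congr_mem _ _
    (fun res word => PySem.Set.update res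
      ((pathsFrom g ((PySem.Str.split₀ s).length - 1) [word]).map (PySem.Str.join " ")))
    _ (fun acc x _ => helperA_eq g _ [x] acc)]
  rw [foldl_update_eq_update_flatMap, List.flatMap_map, List.map_flatMap,
    PySem.Set.ofList_eq_foldl]
  rfl
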